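-- pv_equiv track=rewrite | github.com/aeabijl/advent-of-code-2023 | day1/script2.py | convert_strings_to_digits
-- ===== SOURCE A (Python) =====
-- def convert_strings_to_digits(input_string):
--     valid_digits = {"one": 1, "two": 2, "three": 3, "four": 4, "five": 5, "six": 6, "seven": 7, "eight": 8, "nine": 9}
--     matches = []
--
--     for word, digit in valid_digits.items():
--         index = input_string.find(word)
--         while index != -1:
--             matches.append((digit, index))
--             index = input_string.find(word, index + 1)
--
--     return matches
-- ===== SOURCE B (Python) =====
-- def convert_strings_to_digits(input_string):
--     words = [("one", 1), ("two", 2), ("three", 3), ("four", 4), ("five", 5),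
--              ("six", 6), ("seven", 7), ("eight", 8), ("nine", 9)]
--     matches = []
--     for i in range(len(input_string)):
--         for word, digit in words:
--             if input_string[i:i + len(word)] == word:
--                 matches.append((digit, i))
--     return sorted(matches, key=lambda m: m[0])
-- ===== Notes on version B (the rewrite author's own statement) =====
-- stated objective: alternative
-- what changed: A scans the string once per digit word with repeated str.find calls; B makes a single left-to-right pass testing input_string[i:i+len(word)] == word at every index and then stably sorts the collected matches by digit to recover A's word-grouped, index-ascending order.
import Mathlib
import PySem

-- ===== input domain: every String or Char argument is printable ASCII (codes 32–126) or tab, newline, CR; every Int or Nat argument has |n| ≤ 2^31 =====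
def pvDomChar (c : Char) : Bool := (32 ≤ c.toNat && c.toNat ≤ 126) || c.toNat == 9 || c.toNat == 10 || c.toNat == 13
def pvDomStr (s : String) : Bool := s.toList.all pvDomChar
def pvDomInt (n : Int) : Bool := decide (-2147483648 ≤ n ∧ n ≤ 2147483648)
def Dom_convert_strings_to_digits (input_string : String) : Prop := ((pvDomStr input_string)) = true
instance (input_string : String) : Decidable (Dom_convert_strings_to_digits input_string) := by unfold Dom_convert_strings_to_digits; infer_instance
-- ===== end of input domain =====

-- B replaces A's per-word repeated str.find scans by one left-to-right pass testing
-- input_string[i:i+len(word)] == word plus a stable sort by digit (objective: alternative).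


-- ===== PORT A =====
-- the dict literal 'valid_digits' as an association list in insertion order (shared by both ports)
def pvWords : List (String × Int) :=
  [("one", 1), ("two", 2), ("three", 3), ("four", 4), ("five", 5),
   ("six", 6), ("seven", 7), ("eight", 8), ("nine", 9)]

-- A's inner 'while index != -1' loop; the fuel only makes the loop total (|s|+1 iterations always suffice)
def pvWhileFind (s w : String) (digit : Int) : Nat → Int → List (Int × Int) → List (Int × Int)
  | 0, _, ms => ms
  | fuel + 1, index, ms =>
    if index ≠ -1 then
      pvWhileFind s w digit fuel (PySem.Str.findFrom s w (index + 1)) (ms ++ [(digit, index)])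
    else ms

def convert_strings_to_digits (input_string : String) : List (Int × Int) :=
  pvWords.foldl
    (fun ms wd =>
      pvWhileFind input_string wd.1 wd.2 (input_string.toList.length + 1)
        (PySem.Str.find input_string wd.1) ms)
    []

-- ===== PORT B =====
-- one pass over all indices i, testing input_string[i:i+len(word)] == word (string slice ported
-- exactly via PySem.List.slice on toList), then a stable sort by digit
def convert_strings_to_digits_alt (input_string : String) : List (Int × Int) :=
  let cs := input_string.toList
  let ms :=
    (PySem.List.pyRange 0 (PySem.Str.len input_string) 1).foldl
      (fun acc i =>
        pvWords.foldl
          (fun acc2 wd =>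
            if PySem.List.slice cs (some i) (some (i + PySem.Str.len wd.1)) = wd.1.toList then
              acc2 ++ [(wd.2, i)]
            else acc2)
          acc)
      []
  PySem.List.sorted ms Prod.fst false

-- ===== PRECONDITION & SPEC =====
def Spec_convert_strings_to_digits (input_string : String) (out : List (Int × Int)) : Prop := out = convert_strings_to_digits_alt input_string
instance (input_string : String) (out : List (Int × Int)) : Decidable (Spec_convert_strings_to_digits input_string out) := by unfold Spec_convert_strings_to_digits; infer_instance

-- ===== CLAIM (what is proved, stated in full; the proofs are below) =====
def Claim_equal_convert_strings_to_digits : Prop := ∀ (input_string : String), Dom_convert_strings_to_digits input_string → Spec_convert_strings_to_digits input_string (convert_strings_to_digits input_string)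

-- ===== LEMMAS AND PROOFS =====

-- indices at which w occurs in cs, ascending
def pvOcc (cs w : List Char) : List Nat :=
  (List.range cs.length).filter (fun i => decide (w <+: cs.drop i))

-- the common normal form of both programs: per word (in digit order), all its occurrences
def pvE (s : String) : List (Int × Int) :=
  pvWords.flatMap (fun wd => (pvOcc s.toList wd.1.toList).map (fun (i : Nat) => (wd.2, (i : Int))))

-- B's first pass, normalised
def pvMatches (cs : List Char) : List (Int × Int) :=
  (List.range cs.length).flatMap
    (fun i => (pvWords.filter (fun wd => decide (wd.1.toList <+: cs.drop i))).map
      (fun (wd : String × Int) => (wd.2, (i : Int))))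

def pvDigits : List Int := [1, 2, 3, 4, 5, 6, 7, 8, 9]

lemma pvOcc_pairwise (cs w : List Char) : (pvOcc cs w).Pairwise (· < ·) :=
  List.pairwise_lt_range.filter _

lemma filter_le_cons_of_pairwise (a : Nat) :
    ∀ (l : List Nat), l.Pairwise (· < ·) → a ∈ l →
      l.filter (fun i => decide (a ≤ i)) = a :: l.filter (fun i => decide (a + 1 ≤ i)) := by
  intro l
  induction l with
  | nil => intro _ h; cases h
  | cons x t ih =>
    intro hp hm
    have hx : ∀ y ∈ t, x < y := fun y hy => List.rel_of_pairwise_cons hp hy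
    by_cases hxa : x = a
    · subst hxa
      have h1 : t.filter (fun i => decide (x ≤ i)) = t.filter (fun i => decide (x + 1 ≤ i)) := by
        apply List.filter_congr; intro y hy
        have := hx y hy; simp only [decide_eq_decide]; omega
      have e0 : decide (x ≤ x) = true := by simp
      have e1 : decide (x + 1 ≤ x) = false := by simp
      rw [List.filter_cons, List.filter_cons, e0, e1]
      simp [h1]
    · have hmt : a ∈ t := by
        rcases List.mem_cons.1 hm with h | h
        · exact absurd h.symm hxa
        · exact h
      have hlt : x < a := hx a hmt
      have e0 : decide (a ≤ x) = false := by simp; omega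
      have e1 : decide (a + 1 ≤ x) = false := by simp; omega
      rw [List.filter_cons, List.filter_cons, e0, e1]
      simp [ih hp.of_cons hmt]

lemma pvWhileFind_spec (s w : String) (hw : w.toList ≠ []) (d : Int) :
    ∀ (fuel k : Nat) (ms : List (Int × Int)), k ≤ s.toList.length →
      s.toList.length + 1 - k ≤ fuel →
      pvWhileFind s w d fuel (PySem.Str.findFrom s w (k : Int)) ms
        = ms ++ ((pvOcc s.toList w.toList).filter (fun i => decide (k ≤ i))).map
            (fun (i : Nat) => ((d : Int), (i : Int))) := by
  intro fuel
  induction fuel with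
  | zero => intro k ms hk hf; omega
  | succ fuel ih =>
    intro k ms hk hf
    by_cases hne : PySem.Chars.findFrom s.toList w.toList (k : Int) = -1
    · have hempty : (pvOcc s.toList w.toList).filter (fun i => decide (k ≤ i)) = [] := by
        rw [List.filter_eq_nil_iff]
        intro i hi hki
        have hpre : w.toList <+: s.toList.drop i := by
          have := (List.mem_filter.1 hi).2; simpa using this
        have hik : k ≤ i := by simpa using hki
        have hinfix : w.toList <:+: s.toList.drop k := by
          have hdd : s.toList.drop i = (s.toList.drop k).drop (i - k) := by
            rw [List.drop_drop]; congr 1; omega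
          rw [hdd] at hpre
          exact hpre.isInfix.trans ((s.toList.drop k).drop_suffix (i - k)).isInfix
        exact ((PySem.Chars.findFrom_natCast_eq_neg_one_iff s.toList w.toList k hk).1 hne) hinfix
      simp [pvWhileFind, PySem.Str.findFrom_eq, hne, hempty]
    · obtain ⟨hkj, hpre, hmin⟩ := PySem.Chars.findFrom_natCast_spec s.toList w.toList k hk hne
      set j := PySem.Chars.findFrom s.toList w.toList (k : Int) with hjdef
      have hj0 : (0 : Int) ≤ j := le_trans (by positivity) hkj
      have hjn : ((j.toNat : Int)) = j := Int.toNat_of_nonneg hj0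
      have hjlen : j.toNat < s.toList.length := by
        have h1 : w.toList.length ≤ s.toList.length - j.toNat := by
          have hh := hpre.length_le
          rwa [List.length_drop] at hh
        have h2 : 0 < w.toList.length := List.length_pos_iff.2 hw
        omega
      have hkjn : k ≤ j.toNat := by omega
      have hstep : pvWhileFind s w d (fuel + 1) (PySem.Str.findFrom s w (k : Int)) ms
          = pvWhileFind s w d fuel (PySem.Str.findFrom s w ((j.toNat + 1 : Nat) : Int))
              (ms ++ [(d, j)]) := by
        have hsj : PySem.Str.findFrom s w (k : Int) = j := by simp [hjdef]
        rw [pvWhileFind, hsj, if_pos hne]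
        congr 2
        push_cast [hjn]
        ring
      rw [hstep, ih (j.toNat + 1) (ms ++ [(d, j)]) (by omega) (by omega)]
      have hjmem : j.toNat ∈ pvOcc s.toList w.toList := by
        unfold pvOcc
        rw [List.mem_filter]
        exact ⟨List.mem_range.2 hjlen, by simpa using hpre⟩
      have hcongr : (pvOcc s.toList w.toList).filter (fun i => decide (k ≤ i))
          = (pvOcc s.toList w.toList).filter (fun i => decide (j.toNat ≤ i)) := by
        apply List.filter_congr
        intro i hi
        have hpi : w.toList <+: s.toList.drop i := by
          have := (List.mem_filter.1 hi).2; simpa using this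
        simp only [decide_eq_decide]
        constructor
        · intro hki
          by_contra hlt
          exact hmin i hki (by omega) hpi
        · intro hji; omega
      rw [hcongr, filter_le_cons_of_pairwise j.toNat _ (pvOcc_pairwise _ _) hjmem]
      simp [hjn]

lemma pvA_eq (s : String) : convert_strings_to_digits s = pvE s := by
  unfold convert_strings_to_digits
  rw [PySem.List.foldl_congr_mem _ _
      (fun ms wd => ms ++ (pvOcc s.toList wd.1.toList).map (fun (i : Nat) => (wd.2, (i : Int)))) []
      ?_]
  · rw [PySem.List.foldl_append_eq_flatMap]; simp [pvE]
  · intro ms wd hwd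
    have hw : wd.1.toList ≠ [] := by
      have hall : ∀ wd ∈ pvWords, wd.1.toList ≠ [] := by decide
      exact hall wd hwd
    have h := pvWhileFind_spec s wd.1 hw wd.2 (s.toList.length + 1) 0 ms (by omega) (by omega)
    simp only [Nat.cast_zero, PySem.Str.findFrom_eq, PySem.Chars.findFrom_zero] at h
    have hfind : PySem.Str.find s wd.1 = PySem.Chars.find s.toList wd.1.toList := by
      simp [PySem.Str.find_eq]
    rw [hfind, h]
    congr 1
    have : (pvOcc s.toList wd.1.toList).filter (fun i => decide (0 ≤ i))
        = pvOcc s.toList wd.1.toList := List.filter_eq_self.2 (by simp)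
    rw [this]

-- ===== B side =====

lemma alt_eq_sorted_matches (s : String) :
    convert_strings_to_digits_alt s
      = PySem.List.sorted (pvMatches s.toList) Prod.fst false := by
  unfold convert_strings_to_digits_alt
  dsimp only
  congr 1
  rw [PySem.Str.len_eq, PySem.List.pyRange_zero_nat, List.foldl_map]
  rw [PySem.List.foldl_congr_mem _ _
      (fun acc k => acc ++ (pvWords.filter
        (fun wd => decide (wd.1.toList <+: s.toList.drop k))).map (fun (wd : String × Int) => (wd.2, (k : Int)))) []
      ?_]
  · rw [PySem.List.foldl_append_eq_flatMap]; simp [pvMatches]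
  · intro acc k hk
    rw [PySem.List.foldl_append_ite
      (fun wd => PySem.List.slice s.toList (some (k : Int)) (some ((k : Int) + PySem.Str.len wd.1)) = wd.1.toList)
      (fun (wd : String × Int) => (wd.2, (k : Int)))]
    congr 1
    apply congrArg
    apply List.filter_congr
    intro wd _
    rw [PySem.Str.len_eq, PySem.List.slice_natCast_add]
    simp only [decide_eq_decide]
    rw [List.prefix_iff_eq_take]
    exact ⟨fun h => h.symm, fun h => h.symm⟩

lemma flatMap_ite_singleton {α β : Type} (l : List α) (p : α → Bool) (f : α → β) :
    (l.flatMap (fun a => if p a then [f a] else [])) = (l.filter p).map f := by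
  induction l with
  | nil => rfl
  | cons x t ih => by_cases h : p x <;> simp [List.flatMap_cons, h, ih]

lemma pvMatches_filter (cs : List Char) (w : String) (d : Int)
    (hsingle : pvWords.filter (fun wd => decide (wd.2 = d)) = [(w, d)]) :
    (pvMatches cs).filter (fun m => decide (m.1 = d))
      = (pvOcc cs w.toList).map (fun (i : Nat) => ((d : Int), (i : Int))) := by
  unfold pvMatches
  rw [List.filter_flatMap]
  have hinner : ∀ i : Nat,
      ((pvWords.filter (fun wd => decide (wd.1.toList <+: cs.drop i))).map
        (fun (wd : String × Int) => (wd.2, (i : Int)))).filter (fun m => decide (m.1 = d))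
      = if decide (w.toList <+: cs.drop i) then [((d : Int), (i : Int))] else [] := by
    intro i
    rw [List.filter_map]
    have hcomp : ((fun m : Int × Int => decide (m.1 = d)) ∘ (fun wd : String × Int => (wd.2, (i : Int))))
        = fun wd : String × Int => decide (wd.2 = d) := by
      funext wd; simp [Function.comp]
    rw [hcomp, List.filter_filter]
    have hswap : (pvWords.filter fun wd => decide (wd.2 = d) && decide (wd.1.toList <+: cs.drop i))
        = (pvWords.filter (fun wd => decide (wd.2 = d))).filter
            (fun wd => decide (wd.1.toList <+: cs.drop i)) := by
      rw [List.filter_filter]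
      apply List.filter_congr
      intro wd _
      exact Bool.and_comm _ _
    rw [hswap, hsingle]
    by_cases h : w.toList <+: cs.drop i <;> simp [h]
  calc ((List.range cs.length).flatMap fun i =>
          ((pvWords.filter (fun wd => decide (wd.1.toList <+: cs.drop i))).map
            (fun (wd : String × Int) => (wd.2, (i : Int)))).filter (fun m => decide (m.1 = d)))
      = (List.range cs.length).flatMap
          (fun (i : Nat) => if decide (w.toList <+: cs.drop i) then [((d : Int), (i : Int))] else []) :=
        List.flatMap_congr (fun i _ => hinner i)
    _ = (pvOcc cs w.toList).map (fun (i : Nat) => ((d : Int), (i : Int))) := by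
        rw [flatMap_ite_singleton]; rfl

-- insertion into a list split as "all-not-before ++ all-before" lands exactly between the parts
lemma insertBy_append_not {α : Type} (p : α → α → Bool) (x : α) (l1 l2 : List α)
    (h : ∀ y ∈ l1, p x y = false) :
    PySem.List.insertBy p x (l1 ++ l2) = l1 ++ PySem.List.insertBy p x l2 := by
  induction l1 with
  | nil => rfl
  | cons y t ih =>
    rw [List.cons_append, PySem.List.insertBy, h y (List.mem_cons_self)]
    simp [ih (fun z hz => h z (List.mem_cons_of_mem _ hz))]

lemma insertBy_all {α : Type} (p : α → α → Bool) (x : α) (l : List α)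
    (h : ∀ y ∈ l, p x y = true) :
    PySem.List.insertBy p x l = x :: l := by
  cases l with
  | nil => rfl
  | cons y t => rw [PySem.List.insertBy, h y (List.mem_cons_self)]; simp

lemma pvInsGroup (x : Int × Int) (g : Int → List (Int × Int)) :
    ∀ (D : List Int), D.Pairwise (· < ·) → x.1 ∈ D → (∀ d ∈ D, ∀ y ∈ g d, y.1 = d) →
      PySem.List.insertBy (fun a b => decide (a.1 < b.1)) x (D.flatMap g)
        = D.flatMap (fun d => g d ++ if x.1 = d then [x] else []) := by
  intro D
  induction D with
  | nil => intro _ h; cases h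
  | cons d D' ih =>
    intro hp hm hg
    have hd' : ∀ e ∈ D', d < e := fun e he => List.rel_of_pairwise_cons hp he
    rw [List.flatMap_cons, List.flatMap_cons]
    by_cases hxd : x.1 = d
    · have h1 : ∀ y ∈ g d, (fun a b : Int × Int => decide (a.1 < b.1)) x y = false := by
        intro y hy
        have := hg d (List.mem_cons_self) y hy
        simp [this, hxd]
      have h2 : ∀ y ∈ D'.flatMap g, (fun a b : Int × Int => decide (a.1 < b.1)) x y = true := by
        intro y hy
        obtain ⟨e, he, hye⟩ := List.mem_flatMap.1 hy
        have hy1 : y.1 = e := hg e (List.mem_cons_of_mem _ he) y hye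
        simp [hy1, hxd]
        exact hd' e he
      rw [insertBy_append_not _ _ _ _ h1, insertBy_all _ _ _ h2, if_pos hxd]
      have hrest : D'.flatMap (fun e => g e ++ if x.1 = e then [x] else []) = D'.flatMap g := by
        apply List.flatMap_congr
        intro e he
        have : x.1 ≠ e := by have := hd' e he; omega
        simp [this]
      rw [hrest]
      simp
    · have hmD' : x.1 ∈ D' := by
        rcases List.mem_cons.1 hm with h | h
        · exact absurd h hxd
        · exact h
      have hdx : d < x.1 := hd' _ hmD'
      have h1 : ∀ y ∈ g d, (fun a b : Int × Int => decide (a.1 < b.1)) x y = false := by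
        intro y hy
        have := hg d (List.mem_cons_self) y hy
        simp [this]; omega
      rw [insertBy_append_not _ _ _ _ h1,
        ih hp.of_cons hmD' (fun e he => hg e (List.mem_cons_of_mem _ he)), if_neg hxd]
      simp
  
lemma sorted_snoc (xs : List (Int × Int)) (x : Int × Int) :
    PySem.List.sorted (xs ++ [x]) Prod.fst false
      = PySem.List.insertBy (fun a b => decide (a.1 < b.1)) x
          (PySem.List.sorted xs Prod.fst false) := by
  unfold PySem.List.sorted
  simp [List.foldl_append]

lemma pvSortedGroup (D : List Int) (hD : D.Pairwise (· < ·)) :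
    ∀ xs : List (Int × Int), (∀ m ∈ xs, m.1 ∈ D) →
      PySem.List.sorted xs Prod.fst false
        = D.flatMap (fun d => xs.filter (fun m => decide (m.1 = d))) := by
  intro xs
  induction xs using List.reverseRecOn with
  | nil => intro _; simp [PySem.List.sorted]
  | append_singleton xs x ih =>
    intro hmem
    have hxs : ∀ m ∈ xs, m.1 ∈ D := fun m hm => hmem m (List.mem_append_left _ hm)
    have hx : x.1 ∈ D := hmem x (List.mem_append_right _ (List.mem_cons_self))
    rw [sorted_snoc, ih hxs,
      pvInsGroup x _ D hD hx
        (fun d _ y hy => by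
          have := (List.mem_filter.1 hy).2
          simpa using this)]
    apply List.flatMap_congr
    intro d _
    rw [List.filter_append]
    congr 1
    by_cases h : x.1 = d <;> simp [h]

lemma pvB_eq (s : String) : convert_strings_to_digits_alt s = pvE s := by
  rw [alt_eq_sorted_matches]
  have hmem : ∀ m ∈ pvMatches s.toList, m.1 ∈ pvDigits := by
    intro m hm
    obtain ⟨i, _, hmi⟩ := List.mem_flatMap.1 hm
    obtain ⟨wd, hwd, rfl⟩ := List.mem_map.1 hmi
    have hwd' : wd ∈ pvWords := List.mem_of_mem_filter hwd
    have hall : ∀ wd ∈ pvWords, wd.2 ∈ pvDigits := by decide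
    exact hall wd hwd'
  rw [pvSortedGroup pvDigits (by decide) (pvMatches s.toList) hmem]
  show pvDigits.flatMap (fun d => (pvMatches s.toList).filter (fun m => decide (m.1 = d))) = pvE s
  rw [show pvDigits = [1, 2, 3, 4, 5, 6, 7, 8, 9] from rfl]
  simp only [List.flatMap_cons, List.flatMap_nil, List.append_nil]
  rw [pvMatches_filter s.toList "one" 1 rfl, pvMatches_filter s.toList "two" 2 rfl,
    pvMatches_filter s.toList "three" 3 rfl, pvMatches_filter s.toList "four" 4 rfl,
    pvMatches_filter s.toList "five" 5 rfl, pvMatches_filter s.toList "six" 6 rfl,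
    pvMatches_filter s.toList "seven" 7 rfl, pvMatches_filter s.toList "eight" 8 rfl,
    pvMatches_filter s.toList "nine" 9 rfl]
  simp [pvE, pvWords, List.flatMap_cons, List.flatMap_nil]

-- ===== VERDICT (by name: the statement is the Claim_ definition above) =====
theorem convert_strings_to_digits_spec : Claim_equal_convert_strings_to_digits := by
  intro s _
  unfold Spec_convert_strings_to_digits
  rw [pvA_eq, pvB_eq]
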